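-- pv_equiv track=rewrite | github.com/ethanfel/sorting-sorted | tab_gallery_sorter.py | _add_category_separators
-- ===== SOURCE A (Python) =====
-- from typing import Dict, Set, List, Optional, Tuple
--
-- def _add_category_separators(cats: List[str]) -> List[str]:
--     """Add alphabetical separators between categories."""
--     processed = []
--     last_char = ""
--
--     for cat in cats:
--         current_char = cat[0].upper()
--         if last_char and current_char != last_char:
--             processed.append(f"--- {current_char} ---")
--         processed.append(cat)
--         last_char = current_char
--
--     return processed
-- ===== SOURCE B (Python) =====
-- def _add_category_separators(cats):
--     """Add alphabetical separators between categories."""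
--     processed = []
--     i, n = 0, len(cats)
--     first = True
--     while i < n:
--         key = cats[i][0].upper()
--         # advance j to the end of the run of categories sharing this first letter
--         j = i + 1
--         while j < n and cats[j][0].upper() == key:
--             j += 1
--         if not first:
--             processed.append(f"--- {key} ---")
--         processed.extend(cats[i:j])
--         first = False
--         i = j
--     return processed
-- ===== Notes on version B (the rewrite author's own statement) =====
-- stated objective: alternative
-- what changed: Replaces A's per-element last_char state machine with a two-pointer run scanner that finds each maximal run of categories sharing a first letter and emits a separator before every run but the first.
import Mathlib
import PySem

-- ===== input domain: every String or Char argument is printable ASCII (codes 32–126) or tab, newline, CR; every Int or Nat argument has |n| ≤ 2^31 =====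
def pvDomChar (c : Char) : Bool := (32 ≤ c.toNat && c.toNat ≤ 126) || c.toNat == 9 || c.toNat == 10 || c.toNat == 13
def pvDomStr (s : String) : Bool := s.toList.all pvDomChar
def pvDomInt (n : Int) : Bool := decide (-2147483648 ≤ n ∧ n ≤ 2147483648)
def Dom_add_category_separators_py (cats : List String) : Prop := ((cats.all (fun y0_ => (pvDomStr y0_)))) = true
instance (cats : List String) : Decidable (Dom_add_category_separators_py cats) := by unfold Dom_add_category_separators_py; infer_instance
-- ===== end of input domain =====

-- B groups consecutive categories into first-letter runs with a run scanner and emits a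
-- separator before every run but the first; equivalent to A's last-char state machine.

-- cat[0].upper(): uppercase of the first character (exact on the ASCII domain); "" only when cat = ""
def pvKeyOf (cat : String) : String :=
  match cat.toList with
  | [] => ""
  | c :: _ => String.ofList [PySem.Chars.upperChar c]

-- ===== PORT A =====
-- the for-loop with state (processed, last_char)
def pvALoop : List String → List String → String → List String
  | [], acc, _ => acc
  | cat :: rest, acc, last =>
      let cc := pvKeyOf cat
      let acc1 := if last ≠ "" ∧ cc ≠ last then acc ++ ["--- " ++ cc ++ " ---"] else acc
      pvALoop rest (acc1 ++ [cat]) cc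

def add_category_separators_py (cats : List String) : List String :=
  pvALoop cats [] ""

-- ===== PORT B =====
-- outer while loop: one step per maximal run; inner while loop = takeWhile/dropWhile of the same key
def pvEmitRuns : List String → Bool → List String
  | [], _ => []
  | x :: xs, first =>
      let key := pvKeyOf x
      let run := xs.takeWhile (fun y => pvKeyOf y == key)
      let rest := xs.dropWhile (fun y => pvKeyOf y == key)
      (if first then [] else ["--- " ++ key ++ " ---"]) ++ (x :: run) ++ pvEmitRuns rest false
  termination_by xs _ => xs.length
  decreasing_by
    simp only [List.length_cons]
    exact Nat.lt_succ_of_le (List.length_dropWhile_le _ _)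

def add_category_separators_py_alt (cats : List String) : List String :=
  pvEmitRuns cats true

-- ===== PRECONDITION & SPEC =====
-- Pre_ excludes lists containing an empty string: there A (and B) raise IndexError on cat[0].
def Pre_add_category_separators_py (cats : List String) : Prop := ∀ s ∈ cats, s ≠ ""
instance (cats : List String) : Decidable (Pre_add_category_separators_py cats) := by unfold Pre_add_category_separators_py; infer_instance

def pvWitness_add_category_separators_py : List String := ["apple", "avocado", "Boat", "cat", "Cow"]

def Spec_add_category_separators_py (cats : List String) (out : List String) : Prop := out = add_category_separators_py_alt cats
instance (cats : List String) (out : List String) : Decidable (Spec_add_category_separators_py cats out) := by unfold Spec_add_category_separators_py; infer_instance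

-- ===== CLAIM (what is proved, stated in full; the proofs are below) =====
def Claim_equal_add_category_separators_py : Prop := ∀ (cats : List String), Dom_add_category_separators_py cats → Pre_add_category_separators_py cats → Spec_add_category_separators_py cats (add_category_separators_py cats)

-- ===== LEMMAS AND PROOFS =====

theorem pvKeyOf_ne_empty {s : String} (h : s ≠ "") : pvKeyOf s ≠ "" := by
  unfold pvKeyOf
  cases hs : s.toList with
  | nil => exact absurd (by simpa using congrArg String.ofList hs) h
  | cons c cs => simp

theorem pvEmitRuns_cons (x : String) (xs : List String) (first : Bool) :
    pvEmitRuns (x :: xs) first =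
      (if first then [] else ["--- " ++ pvKeyOf x ++ " ---"]) ++
        (x :: xs.takeWhile (fun y => pvKeyOf y == pvKeyOf x)) ++
        pvEmitRuns (xs.dropWhile (fun y => pvKeyOf y == pvKeyOf x)) false := by
  rw [pvEmitRuns.eq_def]

theorem pvALoop_run (xs : List String) : ∀ (acc : List String) (k : String), k ≠ "" →
    (∀ s ∈ xs, s ≠ "") →
    pvALoop xs acc k =
      acc ++ xs.takeWhile (fun y => pvKeyOf y == k)
          ++ pvEmitRuns (xs.dropWhile (fun y => pvKeyOf y == k)) false := by
  induction xs with
  | nil => intro acc k hk _; rw [pvALoop, pvEmitRuns.eq_def]; simp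
  | cons y ys ih =>
    intro acc k hk hne
    by_cases hkey : pvKeyOf y = k
    · -- same run: no separator
      rw [pvALoop]
      simp only [hkey, List.takeWhile_cons, List.dropWhile_cons]
      rw [if_neg (by simp), ih (acc ++ [y]) k hk (fun s hs => hne s (List.mem_cons_of_mem _ hs))]
      simp
    · -- new run starts at y
      rw [pvALoop]
      have hy : y ≠ "" := hne y (List.mem_cons_self ..)
      have hkne := pvKeyOf_ne_empty hy
      rw [if_pos (show k ≠ "" ∧ pvKeyOf y ≠ k from ⟨hk, hkey⟩), ih (acc ++ ["--- " ++ pvKeyOf y ++ " ---"] ++ [y]) (pvKeyOf y) hkne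
            (fun s hs => hne s (List.mem_cons_of_mem _ hs))]
      rw [List.takeWhile_cons, List.dropWhile_cons]
      simp only [beq_iff_eq, hkey, if_false]
      rw [pvEmitRuns_cons]
      simp

-- top level: the first run never gets a separator (last_char = "" / first = true)
-- ===== VERDICT (by name: the statement is the Claim_ definition above) =====
theorem add_category_separators_py_spec : Claim_equal_add_category_separators_py := by
  intro cats _ hpre
  show add_category_separators_py cats = add_category_separators_py_alt cats
  unfold add_category_separators_py add_category_separators_py_alt
  cases cats with
  | nil => rw [pvALoop, pvEmitRuns.eq_def]
  | cons x xs =>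
    have hx : x ≠ "" := hpre x (List.mem_cons_self ..)
    have hk := pvKeyOf_ne_empty hx
    rw [pvALoop, if_neg (by simp),
        pvALoop_run xs ([] ++ [x]) (pvKeyOf x) hk (fun s hs => hpre s (List.mem_cons_of_mem _ hs)),
        pvEmitRuns_cons]
    simp
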